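-- pv_equiv track=rewrite | github.com/oozk/pyeuler | pyeuler/p100.py | p100_2
-- ===== SOURCE A (Python) =====
-- def p100_2(target):
--     blue=15
--     total=21
--     blue_next=85
--     total_next=120
--     while  total_next < target:
--         blue, total, blue_next, total_next = blue_next, total_next, total_next * 4 + blue - 2, blue_next * 8 + total - 4
--
--     return blue_next
-- ===== SOURCE B (Python) =====
-- def p100_2(target):
--     # Exponentiation-by-squaring on the affine step map, then a greedy binary
--     # descent to the first solution pair whose total meets the target.
--     step = (3, 2, -2, 4, 3, -3)
--
--     def apply(m, p):
--         a, b, c, d, e, f = m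
--         x, y = p
--         return (a * x + b * y + c, d * x + e * y + f)
--
--     def compose(m, n):
--         a, b, c, d, e, f = m
--         g, h, i, j, k, l = n
--         return (a * g + b * j, a * h + b * k, a * i + b * l + c,
--                 d * g + e * j, d * h + e * k, d * i + e * l + f)
--
--     p = (85, 120)
--     if p[1] >= target:
--         return p[0]
--     powers = [step]
--     while apply(powers[-1], p)[1] < target:
--         powers.append(compose(powers[-1], powers[-1]))
--     for g in reversed(powers):
--         q = apply(g, p)
--         if q[1] < target:
--             p = q
--     return apply(step, p)[0]
-- ===== Notes on version B (the rewrite author's own statement) =====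
-- stated objective: alternative
-- what changed: Replaces A's step-by-step while-loop over the recurrence with exponentiation-by-squaring of the affine step map (a list of squared 2x2-affine matrices) followed by a greedy binary descent to the first pair whose total meets the target, so only O(log n) map applications are made instead of n loop iterations.
import Mathlib
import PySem

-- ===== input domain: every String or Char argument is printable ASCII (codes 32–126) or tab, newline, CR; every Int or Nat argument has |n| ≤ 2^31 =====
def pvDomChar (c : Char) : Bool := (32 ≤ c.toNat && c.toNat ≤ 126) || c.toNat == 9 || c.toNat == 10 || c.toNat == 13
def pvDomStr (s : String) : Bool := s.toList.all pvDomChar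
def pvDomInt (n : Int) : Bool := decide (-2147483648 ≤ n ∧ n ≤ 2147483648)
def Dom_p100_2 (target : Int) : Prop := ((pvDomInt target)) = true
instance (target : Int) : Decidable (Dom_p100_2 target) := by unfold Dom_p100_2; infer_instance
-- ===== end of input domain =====

-- B replaces A's linear while-loop over the recurrence by exponentiation-by-squaring of the affine step map plus a greedy binary descent to the first qualifying pair (O(log n) map applications instead of n loop steps; objective: alternative, speed not measured).


-- ===== PORT A =====
-- A's while-loop; the Nat argument is termination fuel only: each iteration raises
-- total_next by at least 1, so (target - 120).toNat bounds the iteration count and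
-- the guard is already false whenever the fuel runs out.
def p100_2_loop (target : Int) : Nat → Int → Int → Int → Int → Int
  | 0, _, _, blue_next, _ => blue_next
  | fuel + 1, blue, total, blue_next, total_next =>
    if total_next < target then
      p100_2_loop target fuel blue_next total_next (total_next * 4 + blue - 2) (blue_next * 8 + total - 4)
    else blue_next

def p100_2 (target : Int) : Int :=
  p100_2_loop target (target - 120).toNat 15 21 85 120

-- ===== PORT B =====
-- Affine map (x,y) ↦ (a*x+b*y+c, d*x+e*y+f), matching Source B's 6-tuples.
structure AffM where
  a : Int
  b : Int
  c : Int
  d : Int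
  e : Int
  f : Int
deriving DecidableEq, Repr

def pvStep : AffM := ⟨3, 2, -2, 4, 3, -3⟩

def pvApply (m : AffM) (p : Int × Int) : Int × Int :=
  (m.a * p.1 + m.b * p.2 + m.c, m.d * p.1 + m.e * p.2 + m.f)

def pvCompose (m n : AffM) : AffM :=
  ⟨m.a * n.a + m.b * n.d, m.a * n.b + m.b * n.e, m.a * n.c + m.b * n.f + m.c,
   m.d * n.a + m.e * n.d, m.d * n.b + m.e * n.e, m.d * n.c + m.e * n.f + m.f⟩

-- Source B's 'while apply(powers[-1], p)[1] < target: powers.append(compose(last,last))';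
-- fuel only (the guard fails long before (target-120).toNat squarings).
def pvBuild (target : Int) (p : Int × Int) : Nat → AffM → List AffM → List AffM
  | 0, _, acc => acc
  | fuel + 1, last, acc =>
    if (pvApply last p).2 < target then
      pvBuild target p fuel (pvCompose last last) (acc ++ [pvCompose last last])
    else acc

def p100_2_alt (target : Int) : Int :=
  let p0 : Int × Int := (85, 120)
  if p0.2 ≥ target then p0.1
  else
    let powers := pvBuild target p0 (target - 120).toNat pvStep [pvStep]
    let p := powers.reverse.foldl
      (fun p g => let q := pvApply g p; if q.2 < target then q else p) p0
    (pvApply pvStep p).1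

-- ===== PRECONDITION & SPEC =====
def Spec_p100_2 (target : Int) (out : Int) : Prop := out = p100_2_alt target
instance (target : Int) (out : Int) : Decidable (Spec_p100_2 target out) := by unfold Spec_p100_2; infer_instance

-- ===== CLAIM (what is proved, stated in full; the proofs are below) =====
def Claim_equal_p100_2 : Prop := ∀ (target : Int), Dom_p100_2 target → Spec_p100_2 target (p100_2 target)

-- ===== LEMMAS AND PROOFS =====

-- the first-order step map and its iterates from (85,120)
def fstep (p : Int × Int) : Int × Int := (3 * p.1 + 2 * p.2 - 2, 4 * p.1 + 3 * p.2 - 3)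

def fIter (n : Nat) : Int × Int := fstep^[n] (85, 120)

-- m denotes n steps of fstep
def Den (m : AffM) (n : Nat) : Prop := ∀ q, pvApply m q = fstep^[n] q

theorem apply_compose (m n : AffM) (p : Int × Int) :
    pvApply (pvCompose m n) p = pvApply m (pvApply n p) := by
  simp [pvApply, pvCompose]; constructor <;> ring

theorem den_step : Den pvStep 1 := by
  intro q
  simp only [pvApply, pvStep, fstep, Function.iterate_one, Prod.mk.injEq]
  omega

theorem den_compose {m m' : AffM} {a b : Nat} (hm : Den m a) (hm' : Den m' b) :
    Den (pvCompose m m') (a + b) := by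
  intro q
  rw [apply_compose, hm', hm, ← Function.iterate_add_apply]

theorem fIter_succ (n : Nat) : fIter (n + 1) = fstep (fIter n) := by
  simp [fIter, Function.iterate_succ_apply']

-- growth: blue stays ≥ 1 and total grows by at least 1 per step
theorem fIter_grow (n : Nat) : 1 ≤ (fIter n).1 ∧ 120 + (n : Int) ≤ (fIter n).2 := by
  induction n with
  | zero => simp [fIter]
  | succ n ih =>
    rw [fIter_succ]
    simp only [fstep]
    push_cast
    omega

theorem fIter_mono {j k : Nat} (h : j ≤ k) : (fIter j).2 ≤ (fIter k).2 := by
  induction k with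
  | zero => simp_all
  | succ k ih =>
    rcases Nat.lt_or_ge j (k + 1) with hlt | hge
    · have := ih (by omega)
      have h1 := fIter_grow k
      rw [fIter_succ]; simp only [fstep]; omega
    · have : j = k + 1 := by omega
      subst this
      exact le_rfl

-- pvBuild spec: the returned list has element k denoting 2^k steps, and the last
-- exponent 2^m already reaches the target.
theorem build_spec (target : Int) : ∀ (fuel i : Nat) (last : AffM) (acc : List AffM),
    Den last (2 ^ i) → acc.length = i + 1 →
    (∀ k (hk : k < acc.length), Den acc[k] (2 ^ k)) →
    target ≤ 120 + ((2 ^ (i + fuel) : Nat) : Int) →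
    ∃ m, (pvBuild target (85, 120) fuel last acc).length = m + 1 ∧
      (∀ k (hk : k < (pvBuild target (85, 120) fuel last acc).length),
        Den (pvBuild target (85, 120) fuel last acc)[k] (2 ^ k)) ∧
      target ≤ (fIter (2 ^ m)).2 := by
  intro fuel
  induction fuel with
  | zero =>
    intro i last acc hlast hlen hden hfuel
    refine ⟨i, ?_, ?_, ?_⟩
    · simpa [pvBuild] using hlen
    · simpa [pvBuild] using hden
    · have := (fIter_grow (2 ^ i)).2
      simp only [Nat.add_zero] at hfuel
      omega
  | succ fuel ih =>
    intro i last acc hlast hlen hden hfuel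
    by_cases hg : (pvApply last (85, 120)).2 < target
    · rw [show pvBuild target (85, 120) (fuel + 1) last acc
          = pvBuild target (85, 120) fuel (pvCompose last last) (acc ++ [pvCompose last last]) by
        simp [pvBuild, hg]]
      have hlast' : Den (pvCompose last last) (2 ^ (i + 1)) := by
        have := den_compose hlast hlast
        rwa [show 2 ^ i + 2 ^ i = 2 ^ (i + 1) by ring] at this
      refine ih (i + 1) _ _ hlast' (by simp [hlen]) ?_ ?_
      · intro k hk
        simp only [List.length_append, List.length_cons, List.length_nil, hlen] at hk
        rcases Nat.lt_or_ge k (i + 1) with hk' | hk'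
        · rw [List.getElem_append_left (by omega)]
          exact hden k (by omega)
        · have : k = i + 1 := by omega
          subst this
          rw [List.getElem_append_right (by omega)]
          simpa [hlen] using hlast'
      · have : i + 1 + fuel = i + (fuel + 1) := by omega
        rw [this]; exact hfuel
    · rw [show pvBuild target (85, 120) (fuel + 1) last acc = acc by simp [pvBuild, hg]]
      refine ⟨i, hlen, hden, ?_⟩
      have h1 := hlast (85, 120)
      rw [h1] at hg
      have h2 : fstep^[2 ^ i] (85, 120) = fIter (2 ^ i) := rfl
      rw [h2] at hg
      omega

-- greedy descent spec: folding the reversed powers list moves p to fIter J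
-- with (fIter J).2 < target ≤ (fIter (J+1)).2
theorem greedy_spec (target : Int) : ∀ (L : List AffM) (j : Nat),
    (∀ k (hk : k < L.length), Den L[k] (2 ^ k)) →
    (fIter j).2 < target → target ≤ (fIter (j + 2 ^ L.length)).2 →
    ∃ J, (L.reverse.foldl (fun p g => let q := pvApply g p; if q.2 < target then q else p) (fIter j))
          = fIter J ∧ (fIter J).2 < target ∧ target ≤ (fIter (J + 1)).2 := by
  intro L
  induction L using List.reverseRecOn with
  | nil =>
    intro j _ hlt hge
    exact ⟨j, rfl, hlt, by simpa using hge⟩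
  | append_singleton L x ih =>
    intro j hden hlt hge
    rw [List.reverse_append, List.reverse_singleton, List.singleton_append, List.foldl_cons]
    have hx : Den x (2 ^ L.length) := by
      have := hden L.length (by simp)
      simpa using this
    have hxj : pvApply x (fIter j) = fIter (j + 2 ^ L.length) := by
      rw [hx (fIter j)]
      show fstep^[2 ^ L.length] (fstep^[j] (85, 120)) = _
      rw [← Function.iterate_add_apply, Nat.add_comm]
      rfl
    have hden' : ∀ k (hk : k < L.length), Den L[k] (2 ^ k) := by
      intro k hk
      have := hden k (by simp; omega)
      rwa [List.getElem_append_left hk] at this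
    by_cases hq : (pvApply x (fIter j)).2 < target
    · simp only [hq, if_pos]
      rw [hxj] at hq ⊢
      refine ih (j + 2 ^ L.length) hden' hq ?_
      have e : j + 2 ^ L.length + 2 ^ L.length = j + 2 ^ (L.length + 1) := by ring
      rw [e]
      simpa using hge
    · simp only [hq, if_neg, not_false_iff]
      rw [hxj] at hq
      exact ih j hden' hlt (by omega)

-- A's loop: invariant — (blue,total) is one fstep behind (blue_next,total_next) = fIter j
theorem aloop_spec (target : Int) (J : Nat)
    (hJ1 : (fIter J).2 < target) (hJ2 : target ≤ (fIter (J + 1)).2) :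
    ∀ (fuel j : Nat) (b t : Int), fstep (b, t) = fIter j → J + 1 ≤ j + fuel → j ≤ J + 1 →
    p100_2_loop target fuel b t (fIter j).1 (fIter j).2 = (fIter (J + 1)).1 := by
  intro fuel
  induction fuel with
  | zero =>
    intro j b t hbt h1 h2
    have hj : j = J + 1 := by omega
    subst hj
    simp [p100_2_loop]
  | succ fuel ih =>
    intro j b t hbt h1 h2
    rcases Nat.lt_or_ge j (J + 1) with hlt | hge
    · have hguard : (fIter j).2 < target :=
        lt_of_le_of_lt (fIter_mono (show j ≤ J by omega)) hJ1
      simp only [p100_2_loop, hguard, if_pos]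
      have hc : (3 : Int) * b + 2 * t - 2 = (fIter j).1 ∧ 4 * b + 3 * t - 3 = (fIter j).2 := by
        constructor
        · exact congrArg Prod.fst hbt
        · exact congrArg Prod.snd hbt
      have hsucc : fIter (j + 1) = fstep (fIter j) := fIter_succ j
      have e1 : (fIter j).2 * 4 + b - 2 = (fIter (j + 1)).1 := by
        rw [hsucc]
        simp only [fstep]
        omega
      have e2 : (fIter j).1 * 8 + t - 4 = (fIter (j + 1)).2 := by
        rw [hsucc]
        simp only [fstep]
        omega
      rw [e1, e2]
      exact ih (j + 1) (fIter j).1 (fIter j).2 (hsucc.symm) (by omega) (by omega)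
    · have hj : j = J + 1 := by omega
      subst hj
      have hguard : ¬ (fIter (J + 1)).2 < target := not_lt.mpr hJ2
      simp [p100_2_loop, hguard]

-- casts needed at top level
theorem two_pow_ge (F : Nat) : (F : Int) ≤ ((2 ^ F : Nat) : Int) := by
  exact_mod_cast Nat.le_of_lt (Nat.lt_two_pow_self)

-- ===== VERDICT (by name: the statement is the Claim_ definition above) =====
theorem p100_2_spec : Claim_equal_p100_2 := by
  intro target _
  unfold Spec_p100_2 p100_2 p100_2_alt
  by_cases hsmall : (120 : Int) ≥ target
  · have hF : (target - 120).toNat = 0 := by omega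
    rw [hF]
    simp [p100_2_loop, hsmall]
  · rw [ge_iff_le, not_le] at hsmall
    simp only [ge_iff_le, if_neg (by omega : ¬ target ≤ (120 : Int))]
    set F := (target - 120).toNat with hFdef
    have hFcast : (F : Int) = target - 120 := by
      rw [hFdef]; omega
    -- build phase
    have hstep1 : Den pvStep (2 ^ 0) := by
      simpa using den_step
    obtain ⟨m, hlen, hdenL, hm⟩ := build_spec target F 0 pvStep [pvStep] hstep1 rfl
      (by
        intro k hk
        have hk0 : k = 0 := by simp at hk; omega
        subst hk0
        simpa using den_step)
      (by
        have := two_pow_ge F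
        simp only [Nat.zero_add]
        omega)
    -- greedy phase
    have h0 : fIter 0 = ((85 : Int), (120 : Int)) := rfl
    obtain ⟨J, hfold, hJ1, hJ2⟩ := greedy_spec target (pvBuild target (85, 120) F pvStep [pvStep]) 0
      hdenL (by rw [h0]; exact hsmall)
      (by
        rw [hlen, Nat.zero_add]
        refine le_trans hm (fIter_mono ?_)
        exact Nat.pow_le_pow_right (by omega) (by omega))
    rw [h0] at hfold
    -- A side
    have hFJ : J + 1 ≤ F := by
      have hg := (fIter_grow J).2
      have : (J : Int) < target - 120 := by omega
      omega
    have hA := aloop_spec target J hJ1 hJ2 F 0 15 21 (by simp [fstep]; rfl) (by omega) (by omega)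
    rw [h0] at hA
    simp only at hA
    rw [hA]
    -- B side
    simp only [hfold]
    rw [den_step (fIter J)]
    rw [fIter_succ J]
    rfl
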